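-- pv_equiv track=rewrite | github.com/hicham9x/TD1-part-2--Python | TD1.PART2/ex2.py | crypter_mc
-- ===== SOURCE A (Python) =====
-- def crypter_mc(x):
--     alpha = 'ABCDEFGHIJKLMNOPQRSTUVWXYZ'
--     res = ''
--     for lettre in x:
--         oc = x.count(lettre)
--         pos = 0
--         if oc % 2 == 0:
--             pos = oc // 2
--         else:
--             pos = oc * 2
--         ordre = alpha.find(lettre)
--         indice = (pos + ordre) % 26
--         res += alpha[indice]
--     return res
-- ===== SOURCE B (Python) =====
-- def crypter_mc(x):
--     alpha = 'ABCDEFGHIJKLMNOPQRSTUVWXYZ'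
--     counts = {}
--     for c in x:
--         counts[c] = counts.get(c, 0) + 1
--     table = {}
--     for c, oc in counts.items():
--         pos = oc // 2 if oc % 2 == 0 else oc * 2
--         table[ord(c)] = alpha[(pos + alpha.find(c)) % 26]
--     return x.translate(table)
-- ===== Notes on version B (the rewrite author's own statement) =====
-- stated objective: faster
-- what changed: Replaces the per-position count-and-append loop (x.count inside the loop, O(n) per char) by one frequency-dict pass, a per-distinct-char encryption table, and a single x.translate application.
import Mathlib
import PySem

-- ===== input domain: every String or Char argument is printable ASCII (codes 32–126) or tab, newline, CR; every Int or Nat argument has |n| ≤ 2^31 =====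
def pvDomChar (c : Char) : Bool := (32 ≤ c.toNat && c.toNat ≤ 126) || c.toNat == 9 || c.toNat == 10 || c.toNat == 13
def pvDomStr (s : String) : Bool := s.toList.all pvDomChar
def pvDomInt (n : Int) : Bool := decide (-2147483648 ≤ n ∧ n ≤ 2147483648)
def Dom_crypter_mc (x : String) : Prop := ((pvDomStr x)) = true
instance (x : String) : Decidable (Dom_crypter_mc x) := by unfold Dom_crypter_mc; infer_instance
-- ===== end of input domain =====

-- B replaces A's per-position x.count scan and string append by one frequency-dict pass,
-- a per-distinct-char table, and a single translate pass.

-- ===== PORT A =====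
-- A's per-character loop: count, even/odd offset, find, index into alpha, append.
-- alpha[indice] is ported by pyGet?: indice = (pos+ordre) % 26 is always in [0,26), so the
-- Option is always some and .toList appends exactly that one character (IndexError unreachable).
def crypter_mc (x : String) : String :=
  let alpha := "ABCDEFGHIJKLMNOPQRSTUVWXYZ".toList
  String.mk (x.toList.foldl (fun res lettre =>
    let oc : Int := (x.toList.count lettre : Int)
    let pos : Int := if PySem.Int.mod oc 2 == 0 then PySem.Int.floordiv oc 2 else oc * 2
    let ordre : Int := PySem.Chars.find alpha [lettre]
    let indice : Int := PySem.Int.mod (pos + ordre) 26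
    res ++ (PySem.List.pyGet? alpha indice).toList) [])

-- ===== PORT B =====
-- B: a counts dict built in one pass, then a table Dict mapping each distinct char to its
-- encrypted char (alpha[…] again by pyGet?, in range as above), then translate = map with
-- identity default (the default is never used: every char of x is a key of the table).
def crypter_mc_alt (x : String) : String :=
  let alpha := "ABCDEFGHIJKLMNOPQRSTUVWXYZ".toList
  let counts : PySem.Dict Char Int :=
    x.toList.foldl (fun d c => d.insert c (d.getD c 0 + 1)) PySem.Dict.empty
  let table : PySem.Dict Char Char :=
    counts.items.foldl (fun (t : PySem.Dict Char Char) p =>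
      let oc := p.2
      let pos : Int := if PySem.Int.mod oc 2 == 0 then PySem.Int.floordiv oc 2 else oc * 2
      let indice : Int := PySem.Int.mod (pos + PySem.Chars.find alpha [p.1]) 26
      t.insert p.1 ((PySem.List.pyGet? alpha indice).getD p.1)) PySem.Dict.empty
  String.mk (x.toList.map (fun c => (table.get? c).getD c))

-- ===== PRECONDITION & SPEC =====
def Spec_crypter_mc (x : String) (out : String) : Prop := out = crypter_mc_alt x
instance (x : String) (out : String) : Decidable (Spec_crypter_mc x out) := by unfold Spec_crypter_mc; infer_instance

-- ===== CLAIM (what is proved, stated in full; the proofs are below) =====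
def Claim_equal_crypter_mc : Prop := ∀ (x : String), Dom_crypter_mc x → Spec_crypter_mc x (crypter_mc x)

-- ===== LEMMAS AND PROOFS =====

-- the common per-character encryption, given the character's count n (proof-side helper)
def pvEnc (n : Int) (c : Char) : Char :=
  let alpha := "ABCDEFGHIJKLMNOPQRSTUVWXYZ".toList
  let pos : Int := if PySem.Int.mod n 2 == 0 then PySem.Int.floordiv n 2 else n * 2
  (PySem.List.pyGet? alpha (PySem.Int.mod (pos + PySem.Chars.find alpha [c]) 26)).getD c

lemma pyGet?_isSome_of_lt (l : List Char) (i : Int) (h0 : 0 ≤ i) (h : i < l.length) :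
    ∃ v, PySem.List.pyGet? l i = some v := by
  simp only [PySem.List.pyGet?, PySem.List.pyIdx?]
  rw [if_pos h0, if_pos h]
  simp [List.getElem?_eq_getElem (show i.toNat < l.length by omega)]

lemma pvEnc_pyGet?_toList (n : Int) (c : Char) :
    (PySem.List.pyGet? "ABCDEFGHIJKLMNOPQRSTUVWXYZ".toList
      (PySem.Int.mod ((if PySem.Int.mod n 2 == 0 then PySem.Int.floordiv n 2 else n * 2)
        + PySem.Chars.find "ABCDEFGHIJKLMNOPQRSTUVWXYZ".toList [c]) 26)).toList
      = [pvEnc n c] := by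
  set i := PySem.Int.mod ((if PySem.Int.mod n 2 == 0 then PySem.Int.floordiv n 2 else n * 2)
        + PySem.Chars.find "ABCDEFGHIJKLMNOPQRSTUVWXYZ".toList [c]) 26 with hi
  have h0 : 0 ≤ i := PySem.Int.mod_nonneg _ (by norm_num)
  have h26 : i < ("ABCDEFGHIJKLMNOPQRSTUVWXYZ".toList).length := by
    have := PySem.Int.mod_lt (a := (if PySem.Int.mod n 2 == 0 then PySem.Int.floordiv n 2 else n * 2)
        + PySem.Chars.find "ABCDEFGHIJKLMNOPQRSTUVWXYZ".toList [c]) (b := 26) (by norm_num)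
    rw [hi]
    simpa using this
  obtain ⟨v, hv⟩ := pyGet?_isSome_of_lt _ _ h0 h26
  simp only [pvEnc]
  rw [← hi, hv]
  rfl

-- A's loop, generalized over the accumulator: it appends pvEnc of each character
lemma crypter_mc_foldl (x : String) (cs acc : List Char) :
    cs.foldl (fun res lettre =>
      res ++ (PySem.List.pyGet? "ABCDEFGHIJKLMNOPQRSTUVWXYZ".toList
        (PySem.Int.mod ((if PySem.Int.mod (x.toList.count lettre : Int) 2 == 0
            then PySem.Int.floordiv (x.toList.count lettre : Int) 2
            else (x.toList.count lettre : Int) * 2)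
          + PySem.Chars.find "ABCDEFGHIJKLMNOPQRSTUVWXYZ".toList [lettre]) 26)).toList) acc
    = acc ++ cs.map (fun c => pvEnc (x.toList.count c) c) := by
  induction cs generalizing acc with
  | nil => simp
  | cons c rest ih =>
    simp only [List.foldl_cons, List.map_cons]
    rw [ih, pvEnc_pyGet?_toList]
    simp

-- A's result is the pointwise map of pvEnc over x's characters
lemma crypter_mc_eq_map (x : String) :
    crypter_mc x = String.mk (x.toList.map (fun c => pvEnc (x.toList.count c) c)) := by
  calc crypter_mc x
      = String.mk (x.toList.foldl (fun res lettre =>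
          res ++ (PySem.List.pyGet? "ABCDEFGHIJKLMNOPQRSTUVWXYZ".toList
            (PySem.Int.mod ((if PySem.Int.mod (x.toList.count lettre : Int) 2 == 0
                then PySem.Int.floordiv (x.toList.count lettre : Int) 2
                else (x.toList.count lettre : Int) * 2)
              + PySem.Chars.find "ABCDEFGHIJKLMNOPQRSTUVWXYZ".toList [lettre]) 26)).toList) []) := rfl
    _ = _ := by rw [crypter_mc_foldl]; simp

-- folding inserts over an items list whose key is absent leaves the lookup unchanged
lemma get?_foldl_insert_of_not_mem (l : List (Char × Int)) (g : Char × Int → Char)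
    (t : PySem.Dict Char Char) (c : Char) (hc : c ∉ l.map (·.1)) :
    (l.foldl (fun t p => t.insert p.1 (g p)) t).get? c = t.get? c := by
  induction l generalizing t with
  | nil => rfl
  | cons p rest ih =>
    simp only [List.map_cons, List.mem_cons] at hc
    push_neg at hc
    simp only [List.foldl_cons]
    rw [ih _ hc.2]
    apply PySem.Dict.get?_insert_of_ne
    exact hc.1

-- folding inserts over a key-nodup items list: lookup of a present key gives its value
lemma get?_foldl_insert_mem (l : List (Char × Int)) (g : Char × Int → Char)
    (t : PySem.Dict Char Char) (c : Char) (n : Int)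
    (hmem : (c, n) ∈ l) (hnd : (l.map (·.1)).Nodup) :
    (l.foldl (fun t p => t.insert p.1 (g p)) t).get? c = some (g (c, n)) := by
  induction l generalizing t with
  | nil => cases hmem
  | cons p rest ih =>
    simp only [List.map_cons, List.nodup_cons] at hnd
    rcases List.mem_cons.mp hmem with h | h
    · subst h
      simp only [List.foldl_cons]
      rw [get?_foldl_insert_of_not_mem _ _ _ _ hnd.1, PySem.Dict.get?_insert_self]
    · exact (List.foldl_cons ..) ▸ ih _ h hnd.2

-- B's result is the same pointwise map
lemma crypter_mc_alt_eq_map (x : String) :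
    crypter_mc_alt x = String.mk (x.toList.map (fun c => pvEnc (x.toList.count c) c)) := by
  calc crypter_mc_alt x
      = String.mk (x.toList.map (fun c =>
          (((PySem.Dict.counter x.toList).items.foldl (fun (t : PySem.Dict Char Char) p =>
            t.insert p.1 ((PySem.List.pyGet? "ABCDEFGHIJKLMNOPQRSTUVWXYZ".toList
              (PySem.Int.mod ((if PySem.Int.mod p.2 2 == 0 then PySem.Int.floordiv p.2 2 else p.2 * 2)
                + PySem.Chars.find "ABCDEFGHIJKLMNOPQRSTUVWXYZ".toList [p.1]) 26)).getD p.1))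
            PySem.Dict.empty).get? c).getD c)) := by
        rw [crypter_mc_alt]
        rw [PySem.Dict.foldl_insert_getD_add_one_eq_counter]
    _ = _ := by
        congr 1
        apply List.map_congr_left
        intro c hc
        rw [PySem.Dict.items_counter]
        have hmem : (c, (x.toList.count c : Int)) ∈
            (PySem.Set.ofList x.toList).map (fun k => (k, (x.toList.count k : Int))) :=
          List.mem_map.mpr ⟨c, (PySem.Set.mem_ofList ..).mpr hc, rfl⟩
        have hnd : (((PySem.Set.ofList x.toList).map
            (fun k => (k, (x.toList.count k : Int)))).map (·.1)).Nodup := by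
          have h1 : ((PySem.Set.ofList x.toList).map
              (fun k => (k, (x.toList.count k : Int)))).map (·.1) = PySem.Set.ofList x.toList := by
            rw [List.map_map,
              show ((fun p : Char × Int => p.1) ∘ fun k => (k, (x.toList.count k : Int))) = id from rfl,
              List.map_id]
          rw [h1]; exact PySem.Set.nodup_ofList _
        rw [get?_foldl_insert_mem _ _ _ _ _ hmem hnd]
        rfl

-- ===== VERDICT (by name: the statement is the Claim_ definition above) =====
theorem crypter_mc_spec : Claim_equal_crypter_mc := by
  intro x _
  unfold Spec_crypter_mc
  rw [crypter_mc_eq_map, crypter_mc_alt_eq_map]
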